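-- pv_equiv track=rewrite | github.com/dawid-sliwa/AOC-2024 | day3.py | check
-- ===== SOURCE A (Python) =====
-- goods = set([",", "0", "1", "2", "3", "4", "5", "6", "7", "8", "9"])
--
-- def check(s: str):
--     idx = 0
--
--     while idx < len(s) - 1 and s[idx] in goods:
--         idx += 1
--     if s[idx] == ")":
--         return True
--     else:
--         return False
-- ===== SOURCE B (Python) =====
-- def check(s: str):
--     j = s.find(")")
--     return j != -1 and all(c in "0123456789," for c in s[:j])
-- ===== Notes on version B (the rewrite author's own statement) =====
-- stated objective: alternative
-- what changed: Instead of walking an index over the leading run of [0-9,] and testing the character where the walk stops, B locates the first ')' with s.find and then validates that every character before it is a digit or comma.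
-- outside the precondition, e.g. on check(''): A raises IndexError, B returns False
import Mathlib
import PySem

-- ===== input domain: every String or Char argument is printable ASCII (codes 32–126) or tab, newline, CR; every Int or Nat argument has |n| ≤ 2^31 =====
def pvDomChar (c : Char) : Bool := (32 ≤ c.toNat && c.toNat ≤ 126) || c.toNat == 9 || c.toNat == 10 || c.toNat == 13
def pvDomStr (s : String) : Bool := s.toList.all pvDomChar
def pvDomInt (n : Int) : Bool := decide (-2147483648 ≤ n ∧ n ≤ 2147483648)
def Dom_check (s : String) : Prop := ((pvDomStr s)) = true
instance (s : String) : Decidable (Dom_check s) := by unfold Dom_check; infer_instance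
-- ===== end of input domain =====

-- B replaces A's index walk over a leading [0-9,] run by a different decomposition:
-- locate the FIRST ')' with s.find, then validate the prefix before it (objective: alternative).

-- ===== PORT A =====
-- goods = set([",", "0", ..., "9"])
def goods : PySem.Set Char :=
  PySem.Set.ofList [',', '0', '1', '2', '3', '4', '5', '6', '7', '8', '9']

-- while idx < len(s) - 1 and s[idx] in goods: idx += 1
-- (fuel = cs.length only makes the loop total: idx stays below cs.length - 1, so it never runs out)
def checkLoop (cs : List Char) : Nat → Nat → Nat
  | 0, idx => idx
  | fuel + 1, idx =>
    if idx < cs.length - 1 ∧ cs.getD idx ' ' ∈ goods then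
      checkLoop cs fuel (idx + 1)
    else idx

def check (s : String) : Bool :=
  let cs := s.toList
  let idx := checkLoop cs cs.length 0
  match PySem.List.pyGet? cs (idx : Int) with
  | some c => c == ')'
  | none => false   -- IndexError: excluded by Pre_check

-- ===== PORT B =====
-- j = s.find(")"); return j != -1 and all(c in "0123456789," for c in s[:j])
def stripChars : List Char := "0123456789,".toList

def check_alt (s : String) : Bool :=
  let cs := s.toList
  let j := PySem.Chars.find cs [')']
  if j == -1 then false
  else (PySem.List.slice cs none (some j)).all (fun c => decide (c ∈ stripChars))

-- ===== PRECONDITION & SPEC =====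
-- A raises IndexError on the empty string (s[0]); the empty string is excluded.
def Pre_check (s : String) : Prop := s ≠ ""
instance (s : String) : Decidable (Pre_check s) := by unfold Pre_check; infer_instance
def pvWitness_check : String := "12,)"

def Spec_check (s : String) (out : Bool) : Prop := out = check_alt s
instance (s : String) (out : Bool) : Decidable (Spec_check s out) := by unfold Spec_check; infer_instance

-- ===== CLAIM =====
def Claim_equal_check : Prop := ∀ (s : String), Dom_check s → Pre_check s → Spec_check s (check s)

-- ===== LEMMAS AND PROOFS =====

-- The two membership tests agree character-by-character.
lemma mem_goods_iff (c : Char) :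
    (c ∈ goods) ↔ (decide (c ∈ stripChars) = true) := by
  have h : stripChars = ['0','1','2','3','4','5','6','7','8','9',','] := by decide
  simp [goods, h, PySem.Set.mem_ofList]
  tauto

lemma close_not_strip : (')' ∈ stripChars) = False := by decide

-- If i < length of takeWhile then the predicate holds at index i.
lemma takeWhile_lt_imp {cs : List Char} {p : Char → Bool} {i : Nat}
    (h : i < (cs.takeWhile p).length) : i < cs.length ∧ p (cs.getD i ' ') = true := by
  induction cs generalizing i with
  | nil => simp at h
  | cons c cs ih =>
    by_cases hp : p c
    · simp only [List.takeWhile, hp, List.length_cons] at h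
      cases i with
      | zero => exact ⟨by simp, by simpa using hp⟩
      | succ j =>
        obtain ⟨h1, h2⟩ := ih (i := j) (by omega)
        exact ⟨by simpa using h1, by simpa using h2⟩
    · simp [List.takeWhile, hp] at h

-- If i = length of takeWhile and i < length then the predicate fails at i.
lemma takeWhile_stop {cs : List Char} {p : Char → Bool} {i : Nat}
    (he : i = (cs.takeWhile p).length) (hl : i < cs.length) : p (cs.getD i ' ') = false := by
  induction cs generalizing i with
  | nil => simp at hl
  | cons c cs ih =>
    by_cases hp : p c
    · simp only [List.takeWhile, hp, List.length_cons] at he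
      cases i with
      | zero => omega
      | succ j =>
        simp only [List.getD_cons_succ]
        exact ih (by omega) (by simpa using hl)
    · simp only [List.takeWhile, hp] at he
      simp only [he]
      exact Bool.eq_false_iff.mpr (by simpa using hp)

-- A's loop computes min M (len - 1), M the length of the leading goods-run.
lemma checkLoop_eq (cs : List Char) (fuel idx : Nat)
    (hfuel : cs.length - 1 - idx ≤ fuel)
    (h1 : idx ≤ (cs.takeWhile (fun c => decide (c ∈ stripChars))).length)
    (h2 : idx ≤ cs.length - 1) :
    checkLoop cs fuel idx =
      min ((cs.takeWhile (fun c => decide (c ∈ stripChars))).length) (cs.length - 1) := by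
  induction fuel generalizing idx with
  | zero => simp only [checkLoop]; omega
  | succ fuel ih => ?_
  rw [checkLoop]
  split
  · rename_i hcond
    obtain ⟨hlt, hmem⟩ := hcond
    have hpidx : decide (cs.getD idx ' ' ∈ stripChars) = true := (mem_goods_iff _).mp hmem
    have hidxM : idx < (cs.takeWhile (fun c => decide (c ∈ stripChars))).length := by
      rcases lt_or_eq_of_le h1 with h | h
      · exact h
      · have := takeWhile_stop (p := fun c => decide (c ∈ stripChars)) h (by omega)
        simp only [hpidx] at this
        cases this
    exact ih (idx + 1) (by omega) (by omega) (by omega)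
  · rename_i hcond
    rw [Classical.not_and_iff_not_or_not] at hcond
    rcases hcond with hlt | hmem
    · omega
    · have hpidx : decide (cs.getD idx ' ' ∈ stripChars) = false := by
        rcases Bool.eq_false_or_eq_true (decide (cs.getD idx ' ' ∈ stripChars)) with h | h
        · exact absurd ((mem_goods_iff _).mpr h) hmem
        · exact h
      have : ¬ idx < (cs.takeWhile (fun c => decide (c ∈ stripChars))).length := by
        intro hiM
        have := (takeWhile_lt_imp (p := fun c => decide (c ∈ stripChars)) hiM).2
        simp only [hpidx] at this
        cases this
      omega

-- [c] is a prefix of l.drop i iff l holds c at index i.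
lemma single_prefix_drop (l : List Char) (c : Char) (i : Nat) :
    ([c] <+: l.drop i) ↔ (i < l.length ∧ l.getD i ' ' = c) := by
  induction l generalizing i with
  | nil => simp
  | cons a t ih =>
    cases i with
    | zero =>
      simp only [List.drop_zero, List.getD_cons_zero, List.length_cons]
      constructor
      · intro h
        rcases h with ⟨r, hr⟩
        cases hr
        exact ⟨by omega, rfl⟩
      · rintro ⟨-, rfl⟩
        exact ⟨t, rfl⟩
    | succ j =>
      simp only [List.drop_succ_cons, List.getD_cons_succ, List.length_cons]
      rw [ih]
      constructor
      · rintro ⟨h1, h2⟩; exact ⟨by omega, h2⟩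
      · rintro ⟨h1, h2⟩; exact ⟨by omega, h2⟩

-- take m is all-p iff p holds at every index below m (within the list).
lemma all_take_iff (cs : List Char) (p : Char → Bool) (m : Nat) :
    ((cs.take m).all p = true) ↔ ∀ i, i < m → i < cs.length → p (cs.getD i ' ') = true := by
  induction cs generalizing m with
  | nil => simp
  | cons c t ih =>
    cases m with
    | zero => simp
    | succ m =>
      simp only [List.take_succ_cons, List.all_cons, Bool.and_eq_true, List.length_cons]
      rw [ih]
      constructor
      · rintro ⟨hc, ht⟩ i hi hil
        cases i with
        | zero => simpa using hc
        | succ j => exact ht j (by omega) (by simpa using hil)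
      · intro h
        refine ⟨by simpa using h 0 (by omega) (by omega), fun j hj hjl => ?_⟩
        simpa using h (j + 1) (by omega) (by omega)

-- ===== VERDICT =====
theorem check_spec : Claim_equal_check := by
  intro s _hdom hpre
  unfold Spec_check
  show check s = check_alt s
  have hne : s.toList ≠ [] := by simp_all [Pre_check]
  set cs := s.toList with hcs
  have hlen : 1 ≤ cs.length := by
    cases h : cs with
    | nil => exact absurd h hne
    | cons a l => simp
  set p : Char → Bool := fun c => decide (c ∈ stripChars) with hp
  set run := (cs.takeWhile p).length with hrun
  have hruns : run ≤ cs.length := by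
    rw [hrun]; exact (List.takeWhile_prefix p).length_le
  set k := min run (cs.length - 1) with hk
  have hkn : k < cs.length := by omega
  have hloop : checkLoop cs cs.length 0 = k :=
    checkLoop_eq cs cs.length 0 (by omega) (Nat.zero_le _) (Nat.zero_le _)
  have hA : check s = (cs.getD k ' ' == ')') := by
    simp only [check, ← hcs, hloop, PySem.List.pyGet?_natCast]
    rw [List.getElem?_eq_getElem hkn, List.getD_eq_getElem _ _ hkn]
  set f := PySem.Chars.find cs [')'] with hf
  by_cases hch : cs.getD k ' ' = ')'
  · -- A returns true; show find = k and the prefix validates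
    have hpref : [')'] <+: cs.drop k := (single_prefix_drop cs ')' k).mpr ⟨hkn, hch⟩
    have hin : PySem.Chars.isIn [')'] cs = true :=
      (PySem.Chars.exists_prefix_drop_iff_isIn [')'] cs).mp ⟨k, hpref⟩
    have hfpos : 0 ≤ f := by
      rw [hf, PySem.Chars.find_nonneg_iff]
      exact (PySem.Chars.isIn_iff_infix [')'] cs).mp hin
    obtain ⟨hfp, hfmin⟩ := PySem.Chars.find_spec hfpos
    obtain ⟨hfl, hfc⟩ := (single_prefix_drop cs ')' f.toNat).mp hfp
    have hgood : ∀ i, i < k → p (cs.getD i ' ') = true := by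
      intro i hi
      exact (takeWhile_lt_imp (p := p) (by omega)).2
    have hfk : f.toNat = k := by
      rcases lt_trichotomy f.toNat k with h | h | h
      · have := hgood _ h
        rw [hfc] at this
        simp [hp, close_not_strip] at this
      · exact h
      · exact absurd hpref (hfmin k h)
    have hfval : f = (k : Int) := by omega
    rw [hA, hch]
    simp only [check_alt, ← hcs, ← hf, hfval]
    have hc : (((k : Int)) == (-1 : Int)) = false := by
      rw [beq_eq_false_iff_ne]; omega
    rw [hc]
    simp only [Bool.false_eq_true, if_false, PySem.List.slice_to_natCast, beq_self_eq_true]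
    symm
    rw [all_take_iff]
    intro i hi _
    exact hgood i hi
  · -- A returns false
    have hAfalse : check s = false := by
      rw [hA]; simp only [beq_eq_false_iff_ne, ne_eq]; exact hch
    rw [hAfalse]
    by_cases hneg : f = -1
    · simp [check_alt, ← hcs, ← hf, hneg]
    · have hfpos : 0 ≤ f := by
        have : [')'] <:+: cs := by
          rw [← PySem.Chars.find_ne_neg_one_iff]; exact hneg
        rw [hf, PySem.Chars.find_nonneg_iff]; exact this
      obtain ⟨hfp, hfmin⟩ := PySem.Chars.find_spec hfpos
      obtain ⟨hfl, hfc⟩ := (single_prefix_drop cs ')' f.toNat).mp hfp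
      -- first ')' lies strictly after k
      have hkf : k < f.toNat := by
        rcases lt_trichotomy f.toNat k with h | h | h
        · have hi : f.toNat < run := by omega
          have := (takeWhile_lt_imp (p := p) (hrun ▸ hi)).2
          rw [hfc] at this
          simp [hp, close_not_strip] at this
        · exact absurd (h ▸ hfc) hch
        · exact h
      -- hence k = run < len - 1 and cs[k] is not good
      have hkrun : k = run := by omega
      have hbad : p (cs.getD k ' ') = false :=
        takeWhile_stop (hkrun.trans hrun) hkn
      have hfval : f = (f.toNat : Int) := by omega
      simp only [check_alt, ← hcs, ← hf]
      rw [if_neg (by simpa using hneg), hfval, PySem.List.slice_to_natCast]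
      symm
      rw [Bool.eq_false_iff]
      intro hall
      have := (all_take_iff cs p f.toNat).mp hall k hkf hkn
      rw [hbad] at this
      cases this
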